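-- pv_equiv track=rewrite | github.com/lienwc/DKGE | code/util/online_util.py | get_affected_entities
-- ===== SOURCE A (Python) =====
-- def get_affected_entities(entity_set1, entity_set2, entity_context_dict1, entity_context_dict2):
--     affected_entities_set1 = set()
--     for entity in entity_set2 - entity_set1:
--         for target_entity, context_set in entity_context_dict2.items():
--             if entity in context_set:
--                 affected_entities_set1.add(target_entity)
--
--     affected_entities_set1 = affected_entities_set1 & entity_set1
--
--     affected_entities_set2 = set()
--     for entity in entity_set1 - entity_set2:
--         for target_entity, context_set in entity_context_dict1.items():
--             if entity in context_set:
--                 affected_entities_set2.add(target_entity)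
--     affected_entities_set2 = affected_entities_set2 & entity_set2
--
--     return affected_entities_set1 | affected_entities_set2
-- ===== SOURCE B (Python) =====
-- def _affected(changed, targets, context_dict):
--     # inverted index: context entity -> list of target entities whose context contains it
--     index = {}
--     for target_entity, context_set in context_dict.items():
--         for c in context_set:
--             index.setdefault(c, []).append(target_entity)
--     result = set()
--     for e in changed:
--         for t in index.get(e, ()):
--             if t in targets:
--                 result.add(t)
--     return result
--
-- def get_affected_entities(entity_set1, entity_set2, entity_context_dict1, entity_context_dict2):
--     return (_affected(entity_set2 - entity_set1, entity_set1, entity_context_dict2)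
--             | _affected(entity_set1 - entity_set2, entity_set2, entity_context_dict1))
-- ===== Notes on version B (the rewrite author's own statement) =====
-- stated objective: faster
-- what changed: Instead of scanning every (target, context) entry of the context dict for each changed entity, B builds an inverted index (context entity -> list of target entities) once and then does a direct lookup per changed entity, filtering by target-set membership while collecting.
import Mathlib
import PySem

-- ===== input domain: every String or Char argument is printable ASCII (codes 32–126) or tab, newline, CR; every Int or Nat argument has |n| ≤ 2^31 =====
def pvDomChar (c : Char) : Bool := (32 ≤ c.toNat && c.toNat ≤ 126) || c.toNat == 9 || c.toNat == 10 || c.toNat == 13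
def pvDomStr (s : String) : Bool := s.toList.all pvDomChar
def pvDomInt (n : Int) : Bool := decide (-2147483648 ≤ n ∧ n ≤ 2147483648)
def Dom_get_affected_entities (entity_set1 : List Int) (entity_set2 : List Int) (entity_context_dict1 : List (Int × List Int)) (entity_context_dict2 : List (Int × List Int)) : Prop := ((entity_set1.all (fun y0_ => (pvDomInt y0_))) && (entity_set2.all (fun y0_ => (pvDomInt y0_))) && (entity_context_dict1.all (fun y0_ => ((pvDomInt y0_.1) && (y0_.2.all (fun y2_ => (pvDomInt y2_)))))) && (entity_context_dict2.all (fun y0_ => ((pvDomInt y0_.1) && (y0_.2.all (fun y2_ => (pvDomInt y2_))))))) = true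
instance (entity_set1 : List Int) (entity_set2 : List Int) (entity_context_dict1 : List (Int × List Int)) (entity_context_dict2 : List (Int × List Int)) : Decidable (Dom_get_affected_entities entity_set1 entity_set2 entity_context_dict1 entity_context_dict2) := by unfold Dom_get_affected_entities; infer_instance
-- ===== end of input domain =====

-- B replaces A's scan of the whole context dict per changed entity by an inverted index
-- (context entity -> target entities) built once, looked up per changed entity; return values agree.

-- ===== PORT A =====
-- one pass of A: for entity in changed: for (target, ctx) in dict.items(): if entity in ctx: acc.add(target)
def gaePass (changed : List Int) (dict : List (Int × List Int)) : PySem.Set Int :=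
  changed.foldl (fun acc e =>
      dict.foldl (fun acc2 p => if e ∈ p.2 then PySem.Set.add acc2 p.1 else acc2) acc)
    PySem.Set.empty

def get_affected_entities (entity_set1 : List Int) (entity_set2 : List Int) (entity_context_dict1 : List (Int × List Int)) (entity_context_dict2 : List (Int × List Int)) : List Int :=
  let a1 := gaePass (PySem.Set.diff (PySem.Set.ofList entity_set2) entity_set1) entity_context_dict2
  let a1 := PySem.Set.inter a1 entity_set1
  let a2 := gaePass (PySem.Set.diff (PySem.Set.ofList entity_set1) entity_set2) entity_context_dict1
  let a2 := PySem.Set.inter a2 entity_set2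
  PySem.Set.union a1 a2

-- ===== PORT B =====
-- index.setdefault(c, []).append(target)  ==  index[c] = index.get(c, []) + [target]  ==  Dict.modify
def gaeIndex (dict : List (Int × List Int)) : PySem.Dict Int (List Int) :=
  dict.foldl (fun idx p => p.2.foldl (fun i c => i.modify c [] (· ++ [p.1])) idx) PySem.Dict.empty

def gaeAffected (changed : List Int) (targets : List Int) (dict : List (Int × List Int)) : PySem.Set Int :=
  let idx := gaeIndex dict
  changed.foldl (fun acc e =>
      (idx.getD e []).foldl (fun acc2 t => if t ∈ targets then PySem.Set.add acc2 t else acc2) acc)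
    PySem.Set.empty

def get_affected_entities_alt (entity_set1 : List Int) (entity_set2 : List Int) (entity_context_dict1 : List (Int × List Int)) (entity_context_dict2 : List (Int × List Int)) : List Int :=
  PySem.Set.union
    (gaeAffected (PySem.Set.diff (PySem.Set.ofList entity_set2) entity_set1) entity_set1 entity_context_dict2)
    (gaeAffected (PySem.Set.diff (PySem.Set.ofList entity_set1) entity_set2) entity_set2 entity_context_dict1)

-- ===== PRECONDITION & SPEC =====
-- Pre_ only states the set-representation invariant: the context values are Python sets, so the
-- lists that encode them are duplicate-free (every input actually reaching the Python A satisfies it).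
def Pre_get_affected_entities (entity_set1 : List Int) (entity_set2 : List Int) (entity_context_dict1 : List (Int × List Int)) (entity_context_dict2 : List (Int × List Int)) : Prop :=
  (∀ p ∈ entity_context_dict1, p.2.Nodup) ∧ (∀ p ∈ entity_context_dict2, p.2.Nodup)
instance (entity_set1 : List Int) (entity_set2 : List Int) (entity_context_dict1 : List (Int × List Int)) (entity_context_dict2 : List (Int × List Int)) : Decidable (Pre_get_affected_entities entity_set1 entity_set2 entity_context_dict1 entity_context_dict2) := by unfold Pre_get_affected_entities; infer_instance

def pvWitness_get_affected_entities : List Int × List Int × (List (Int × List Int)) × (List (Int × List Int)) :=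
  ([1, 2], [2, 3], [(1, [2, 5]), (4, [3])], [(2, [3, 1]), (1, [7])])

def Spec_get_affected_entities (entity_set1 : List Int) (entity_set2 : List Int) (entity_context_dict1 : List (Int × List Int)) (entity_context_dict2 : List (Int × List Int)) (out : List Int) : Prop := out = get_affected_entities_alt entity_set1 entity_set2 entity_context_dict1 entity_context_dict2
instance (entity_set1 : List Int) (entity_set2 : List Int) (entity_context_dict1 : List (Int × List Int)) (entity_context_dict2 : List (Int × List Int)) (out : List Int) : Decidable (Spec_get_affected_entities entity_set1 entity_set2 entity_context_dict1 entity_context_dict2 out) := by unfold Spec_get_affected_entities; infer_instance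

-- ===== CLAIM (what is proved, stated in full; the proofs are below) =====
def Claim_equal_get_affected_entities : Prop := ∀ (entity_set1 : List Int) (entity_set2 : List Int) (entity_context_dict1 : List (Int × List Int)) (entity_context_dict2 : List (Int × List Int)), Dom_get_affected_entities entity_set1 entity_set2 entity_context_dict1 entity_context_dict2 → Pre_get_affected_entities entity_set1 entity_set2 entity_context_dict1 entity_context_dict2 → Spec_get_affected_entities entity_set1 entity_set2 entity_context_dict1 entity_context_dict2 (get_affected_entities entity_set1 entity_set2 entity_context_dict1 entity_context_dict2)

-- ===== LEMMAS AND PROOFS =====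

-- foldl respects pointwise-equal step functions
theorem gae_foldl_congr {α β : Type} (l : List β) (f g : α → β → α) (a : α)
    (h : ∀ acc x, x ∈ l → f acc x = g acc x) : l.foldl f a = l.foldl g a := by
  induction l generalizing a with
  | nil => rfl
  | cons x rest ih =>
    simp only [List.foldl_cons]
    rw [h a x List.mem_cons_self]
    exact ih _ (fun acc y hy => h acc y (List.mem_cons_of_mem _ hy))

-- targets of dict entries whose context contains e, in dict order
def gaeHits (dict : List (Int × List Int)) (e : Int) : List Int :=
  (dict.filter (fun p => decide (e ∈ p.2))).map Prod.fst

-- a modify-loop over a context not containing e leaves the entry at e unchanged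
theorem gae_modify_not_mem (ctx : List Int) (t e : Int) (idx : PySem.Dict Int (List Int))
    (h : e ∉ ctx) :
    (ctx.foldl (fun i c => i.modify c [] (· ++ [t])) idx).getD e [] = idx.getD e [] := by
  induction ctx generalizing idx with
  | nil => rfl
  | cons c rest ih =>
    simp only [List.foldl_cons]
    rw [ih _ (fun hm => h (List.mem_cons_of_mem _ hm))]
    rw [PySem.Dict.getD_modify]
    simp only [List.mem_cons, not_or] at h
    simp [h.1]

theorem gae_modify_ctx (ctx : List Int) (t e : Int) (idx : PySem.Dict Int (List Int))
    (hnd : ctx.Nodup) :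
    (ctx.foldl (fun i c => i.modify c [] (· ++ [t])) idx).getD e []
      = idx.getD e [] ++ (if e ∈ ctx then [t] else []) := by
  induction ctx generalizing idx with
  | nil => simp
  | cons c rest ih =>
    simp only [List.foldl_cons]
    rcases List.nodup_cons.mp hnd with ⟨hc, hrest⟩
    by_cases hce : e = c
    · subst hce
      rw [gae_modify_not_mem _ _ _ _ hc]
      rw [PySem.Dict.getD_modify]
      simp
    · rw [ih _ hrest, PySem.Dict.getD_modify]
      simp [hce]

-- the inverted index at e lists exactly the targets whose context contains e, in dict order
theorem gae_index_getD (dict : List (Int × List Int)) (e : Int)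
    (hnd : ∀ p ∈ dict, p.2.Nodup) :
    (gaeIndex dict).getD e [] = gaeHits dict e := by
  unfold gaeIndex
  suffices h : ∀ idx : PySem.Dict Int (List Int),
      (dict.foldl (fun idx p => p.2.foldl (fun i c => i.modify c [] (· ++ [p.1])) idx) idx).getD e []
        = idx.getD e [] ++ gaeHits dict e by
    simpa using h PySem.Dict.empty
  induction dict with
  | nil => intro idx; simp [gaeHits]
  | cons p rest ih =>
    intro idx
    simp only [List.foldl_cons]
    rw [ih (fun q hq => hnd q (List.mem_cons_of_mem _ hq)),
        gae_modify_ctx _ _ _ _ (hnd p List.mem_cons_self)]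
    simp only [gaeHits, List.filter_cons]
    by_cases he : e ∈ p.2 <;> simp [he]

-- A's inner scan of the dict for one changed entity is a fold over gaeHits
theorem gae_inner_scan (dict : List (Int × List Int)) (e : Int)
    (g : PySem.Set Int → Int → PySem.Set Int) (acc : PySem.Set Int) :
    dict.foldl (fun a p => if e ∈ p.2 then g a p.1 else a) acc = (gaeHits dict e).foldl g acc := by
  induction dict generalizing acc with
  | nil => rfl
  | cons p rest ih =>
    simp only [List.foldl_cons, gaeHits, List.filter_cons]
    by_cases he : e ∈ p.2 <;> simp [he, ih, gaeHits]

-- nested fold over per-entity lists = fold over the flattened list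
theorem gae_flatten (changed : List Int) (F : Int → List Int)
    (g : PySem.Set Int → Int → PySem.Set Int) (acc : PySem.Set Int) :
    changed.foldl (fun a e => (F e).foldl g a) acc = (changed.flatMap F).foldl g acc := by
  induction changed generalizing acc with
  | nil => rfl
  | cons e rest ih => simp [List.flatMap_cons, List.foldl_append, ih]

-- intersecting after adding = filtering while adding
theorem gae_inter_add (L : List Int) (s : PySem.Set Int) (S : List Int) :
    PySem.Set.inter (L.foldl PySem.Set.add s) S
      = L.foldl (fun a t => if t ∈ S then PySem.Set.add a t else a) (PySem.Set.inter s S) := by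
  induction L generalizing s with
  | nil => rfl
  | cons t rest ih =>
    simp only [List.foldl_cons]
    rw [ih]
    congr 1
    by_cases hS : t ∈ S
    · simp only [hS, if_true]
      by_cases hs : t ∈ s
      · rw [PySem.Set.add_of_mem hs, PySem.Set.add_of_mem (by rw [PySem.Set.mem_inter]; exact ⟨hs, hS⟩)]
      · rw [PySem.Set.add_of_not_mem hs,
            PySem.Set.add_of_not_mem (fun hm => hs ((PySem.Set.mem_inter _ _ _).mp hm).1)]
        simp [PySem.Set.inter, List.filter_append, hS]
    · simp only [hS, if_false]
      by_cases hs : t ∈ s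
      · rw [PySem.Set.add_of_mem hs]
      · rw [PySem.Set.add_of_not_mem hs]
        simp [PySem.Set.inter, List.filter_append, hS]

-- one whole pass agrees
theorem gae_pass_eq (changed : List Int) (targets : List Int) (dict : List (Int × List Int))
    (hnd : ∀ p ∈ dict, p.2.Nodup) :
    PySem.Set.inter (gaePass changed dict) targets = gaeAffected changed targets dict := by
  unfold gaePass gaeAffected
  have hA : ∀ acc : PySem.Set Int,
      changed.foldl (fun acc e =>
          dict.foldl (fun acc2 p => if e ∈ p.2 then PySem.Set.add acc2 p.1 else acc2) acc) acc
        = (changed.flatMap (gaeHits dict)).foldl PySem.Set.add acc := by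
    intro acc
    rw [← gae_flatten]
    exact gae_foldl_congr _ _ _ _ (fun a e _ => gae_inner_scan dict e _ a)
  rw [hA, gae_inter_add]
  have hB : (changed.foldl (fun acc e =>
      ((gaeIndex dict).getD e []).foldl
        (fun acc2 t => if t ∈ targets then PySem.Set.add acc2 t else acc2) acc) PySem.Set.empty)
      = (changed.flatMap (gaeHits dict)).foldl
          (fun a t => if t ∈ targets then PySem.Set.add a t else a) PySem.Set.empty := by
    rw [← gae_flatten]
    exact (gae_foldl_congr _ _ _ _ (fun a e _ => by rw [gae_index_getD dict e hnd])).symm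
  rw [hB]
  rfl

-- ===== VERDICT (by name: the statement is the Claim_ definition above) =====
theorem get_affected_entities_spec : Claim_equal_get_affected_entities := by
  intro es1 es2 d1 d2 _ hpre
  unfold Spec_get_affected_entities get_affected_entities get_affected_entities_alt
  simp only []
  rw [gae_pass_eq _ _ _ hpre.2, gae_pass_eq _ _ _ hpre.1]
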